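-- pv_equiv track=rewrite | github.com/Peepow2/ComProgYear1 | 2110101_2-2023/Homework/3.py | get_section_point_count
-- ===== SOURCE A (Python) =====
-- def get_section_point_count(stu_section_points, min_point):
--     L = list()
--     ADD_Index = list()
--     for S in stu_section_points:
--         if S[0] not in ADD_Index:
--             ADD_Index.append(S[0])
--             L.append([S[0], 0])
--
--         if S[1] >= min_point:
--             idx = ADD_Index.index(S[0])
--             L[idx][1] += 1
--     return sorted(L)
-- ===== SOURCE B (Python) =====
-- def get_section_point_count(stu_section_points, min_point):
--     sections = {s[0] for s in stu_section_points}
--     return [[sec, sum(1 for s in stu_section_points if s[0] == sec and s[1] >= min_point)]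
--             for sec in sorted(sections)]
-- ===== Notes on version B (the rewrite author's own statement) =====
-- stated objective: idiomatic
-- what changed: A's single pass that maintains parallel lists with a linear membership test and a linear ADD_Index.index scan per element, then sorts the pair rows, is replaced by the idiomatic 'sorted set of sections, then one count per section' comprehension with no final sort of the rows.
import Mathlib
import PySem

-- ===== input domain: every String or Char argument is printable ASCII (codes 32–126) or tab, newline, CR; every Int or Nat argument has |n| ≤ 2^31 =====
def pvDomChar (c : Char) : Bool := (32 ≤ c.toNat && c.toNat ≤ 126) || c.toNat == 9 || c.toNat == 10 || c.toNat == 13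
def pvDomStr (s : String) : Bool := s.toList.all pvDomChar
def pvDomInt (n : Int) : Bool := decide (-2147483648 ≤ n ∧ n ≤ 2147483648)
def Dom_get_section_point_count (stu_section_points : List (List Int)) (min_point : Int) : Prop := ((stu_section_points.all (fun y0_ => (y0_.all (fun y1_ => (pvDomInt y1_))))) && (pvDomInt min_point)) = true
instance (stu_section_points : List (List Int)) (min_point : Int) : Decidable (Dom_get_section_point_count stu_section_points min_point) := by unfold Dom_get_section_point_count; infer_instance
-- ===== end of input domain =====

-- B replaces A's incremental membership/index-scan loop by "sorted set of sections, then one count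
-- per section" (objective: idiomatic; no speed claim).

-- ===== PORT A =====
-- L[idx][1] += 1 on a [section, count] row
def pvInc1 (row : List Int) : List Int :=
  match row with
  | a :: b :: rest => a :: (b + 1) :: rest
  | r => r

-- A's for-loop, state = (L, ADD_Index); ADD_Index.index(S[0]) cannot miss (S[0] was just ensured
-- to be a member), so the `none` branch is unreachable
def pvALoop (min_point : Int) : List (List Int) → List (List Int) × List Int → List (List Int) × List Int
  | [], st => st
  | S :: rest, (L0, idxs0) =>
      let s0 := PySem.List.pyGetD S 0 0
      let st1 := if s0 ∈ idxs0 then (L0, idxs0) else (L0 ++ [[s0, 0]], idxs0 ++ [s0])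
      let st2 :=
        if PySem.List.pyGetD S 1 0 ≥ min_point then
          match PySem.List.index? st1.2 s0 with
          | some i => (st1.1.modify i pvInc1, st1.2)
          | none => st1
        else st1
      pvALoop min_point rest st2

def get_section_point_count (stu_section_points : List (List Int)) (min_point : Int) : List (List Int) :=
  PySem.List.sorted (pvALoop min_point stu_section_points ([], [])).1 (fun x => x)

-- ===== PORT B =====
def get_section_point_count_alt (stu_section_points : List (List Int)) (min_point : Int) : List (List Int) :=
  let sections : PySem.Set Int := PySem.Set.ofList (stu_section_points.map (fun s => PySem.List.pyGetD s 0 0))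
  (PySem.List.sorted sections (fun x => x)).map (fun sec =>
    [sec, stu_section_points.foldl
      (fun acc s => if PySem.List.pyGetD s 0 0 = sec ∧ PySem.List.pyGetD s 1 0 ≥ min_point then acc + 1 else acc) 0])

-- ===== PRECONDITION & SPEC =====
-- Pre_: every student row has at least two entries; on shorter rows both Pythons raise IndexError
-- (A at S[0]/S[1], B at s[0]/s[1]).
def Pre_get_section_point_count (stu_section_points : List (List Int)) (min_point : Int) : Prop :=
  ∀ S ∈ stu_section_points, 2 ≤ S.length
instance (stu_section_points : List (List Int)) (min_point : Int) : Decidable (Pre_get_section_point_count stu_section_points min_point) := by unfold Pre_get_section_point_count; infer_instance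
def pvWitness_get_section_point_count : List (List Int) × Int := ([[1, 5], [2, 3], [1, 2]], 3)

def Spec_get_section_point_count (stu_section_points : List (List Int)) (min_point : Int) (out : List (List Int)) : Prop := out = get_section_point_count_alt stu_section_points min_point
instance (stu_section_points : List (List Int)) (min_point : Int) (out : List (List Int)) : Decidable (Spec_get_section_point_count stu_section_points min_point out) := by unfold Spec_get_section_point_count; infer_instance

-- ===== CLAIM (what is proved, stated in full; the proofs are below) =====
def Claim_equal_get_section_point_count : Prop := ∀ (stu_section_points : List (List Int)) (min_point : Int), Dom_get_section_point_count stu_section_points min_point → Pre_get_section_point_count stu_section_points min_point → Spec_get_section_point_count stu_section_points min_point (get_section_point_count stu_section_points min_point)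

-- ===== LEMMAS AND PROOFS =====

-- number of rows with section `sec` and enough points, as an Int
def pvCnt (min_point : Int) (l : List (List Int)) (sec : Int) : Int :=
  (l.countP (fun s => decide (PySem.List.pyGetD s 0 0 = sec ∧ PySem.List.pyGetD s 1 0 ≥ min_point)) : Int)

lemma pvModify_map (pre suf : List Int) (v : Int) (f : Int → List Int) (g : List Int → List Int) :
    ((pre ++ v :: suf).map f).modify pre.length g = pre.map f ++ g (f v) :: suf.map f := by
  rw [List.modify_eq_set]
  simp

lemma pvCnt_cons (min_point : Int) (S : List Int) (rest : List (List Int)) (sec : Int) :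
    pvCnt min_point (S :: rest) sec =
      (if PySem.List.pyGetD S 0 0 = sec ∧ PySem.List.pyGetD S 1 0 ≥ min_point then 1 else 0)
        + pvCnt min_point rest sec := by
  simp only [pvCnt, List.countP_cons]
  split_ifs <;> simp_all <;> omega

-- A's loop invariant: starting from nodup sections `idxs` with rows `[s, c s]`, the loop extends
-- `idxs` with the new sections of `rest` in first-occurrence order (= PySem.Set.update) and the
-- final rows carry the per-section counts of `rest` added onto the incoming ones.
lemma pvALoop_inv (min_point : Int) (rest : List (List Int)) (idxs : List Int) (c : Int → Int)
    (hnd : idxs.Nodup) :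
    pvALoop min_point rest (idxs.map (fun s => [s, c s]), idxs) =
      ((PySem.Set.update idxs (rest.map (fun s => PySem.List.pyGetD s 0 0))).map
          (fun s => [s, (if s ∈ idxs then c s else 0) + pvCnt min_point rest s]),
        PySem.Set.update idxs (rest.map (fun s => PySem.List.pyGetD s 0 0))) := by
  induction rest generalizing idxs c with
  | nil =>
      simp [pvALoop, pvCnt, PySem.Set.update]
      intro a ha ha'
      exact absurd ha ha'
  | cons S rest ih =>
      have hs0mem : PySem.List.pyGetD S 0 0 ∈ PySem.Set.add idxs (PySem.List.pyGetD S 0 0) :=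
        (PySem.Set.mem_add _ _ _).2 (Or.inr rfl)
      have hupd : ∀ t : List Int, PySem.Set.update idxs
            (PySem.List.pyGetD S 0 0 :: t) = PySem.Set.update (PySem.Set.add idxs (PySem.List.pyGetD S 0 0)) t := fun _ => rfl
      have key : ∀ (idxs₁ : List Int) (c₁ : Int → Int), idxs₁.Nodup →
          PySem.Set.add idxs (PySem.List.pyGetD S 0 0) = idxs₁ →
          (∀ s, s ∈ idxs₁ ∨ s ≠ PySem.List.pyGetD S 0 0 →
            (if s ∈ idxs₁ then c₁ s else 0) + pvCnt min_point rest s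
              = (if s ∈ idxs then c s else 0) + pvCnt min_point (S :: rest) s) →
          pvALoop min_point rest (idxs₁.map (fun s => [s, c₁ s]), idxs₁) =
            ((PySem.Set.update idxs ((S :: rest).map (fun s => PySem.List.pyGetD s 0 0))).map
                (fun s => [s, (if s ∈ idxs then c s else 0) + pvCnt min_point (S :: rest) s]),
              PySem.Set.update idxs ((S :: rest).map (fun s => PySem.List.pyGetD s 0 0))) := by
        intro idxs₁ c₁ hnd₁ hadd hagree
        rw [ih idxs₁ c₁ hnd₁]
        simp only [List.map_cons, hupd, hadd]
        refine Prod.ext ?_ rfl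
        refine List.map_congr_left (fun s hs => ?_)
        by_cases hsi : s ∈ idxs₁
        · rw [hagree s (Or.inl hsi)]
        · have hne : s ≠ PySem.List.pyGetD S 0 0 := by
            rintro rfl
            exact hsi (hadd ▸ hs0mem)
          rw [hagree s (Or.inr hne)]
      by_cases hm : PySem.List.pyGetD S 0 0 ∈ idxs
      · -- section already known
        have hadd : PySem.Set.add idxs (PySem.List.pyGetD S 0 0) = idxs := by
          simp [PySem.Set.add, hm]
        by_cases hp : PySem.List.pyGetD S 1 0 ≥ min_point
        · -- count incremented at the existing row
          obtain ⟨i, hidx⟩ : ∃ i, PySem.List.index? idxs (PySem.List.pyGetD S 0 0) = some i := by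
            have := (PySem.List.index?_isSome_iff idxs (PySem.List.pyGetD S 0 0)).2 hm
            exact Option.isSome_iff_exists.1 this
          obtain ⟨pre, suf, hsplit, hlen, hnp⟩ := (PySem.List.index?_eq_some_iff _ _ _).1 hidx
          have hns : PySem.List.pyGetD S 0 0 ∉ suf := by
            subst hsplit
            simp [List.nodup_append] at hnd
            tauto
          have hmod : (idxs.map (fun s => [s, c s])).modify i pvInc1 =
              idxs.map (fun s => [s, if s = PySem.List.pyGetD S 0 0 then c s + 1 else c s]) := by
            subst hsplit hlen
            have hpre : pre.map (fun s => [s, if s = PySem.List.pyGetD S 0 0 then c s + 1 else c s])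
                = pre.map (fun s => [s, c s]) := List.map_congr_left (fun s hs => by
              have : s ≠ PySem.List.pyGetD S 0 0 := fun h => hnp (h ▸ hs)
              simp [this])
            have hsuf : suf.map (fun s => [s, if s = PySem.List.pyGetD S 0 0 then c s + 1 else c s])
                = suf.map (fun s => [s, c s]) := List.map_congr_left (fun s hs => by
              have : s ≠ PySem.List.pyGetD S 0 0 := fun h => hns (h ▸ hs)
              simp [this])
            rw [pvModify_map, List.map_append, List.map_cons, hpre, hsuf]
            simp [pvInc1]
          have hstep : pvALoop min_point (S :: rest) (idxs.map (fun s => [s, c s]), idxs) =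
              pvALoop min_point rest
                (idxs.map (fun s => [s, if s = PySem.List.pyGetD S 0 0 then c s + 1 else c s]), idxs) := by
            simp only [pvALoop, hm, if_true, if_pos hp, hidx, hmod]
          rw [hstep]
          refine key idxs _ hnd hadd (fun s hcase => ?_)
          rw [pvCnt_cons]
          by_cases hse : s = PySem.List.pyGetD S 0 0
          · subst hse
            simp [hm, hp]
            omega
          · have h1 : ¬ (PySem.List.pyGetD S 0 0 = s ∧ PySem.List.pyGetD S 1 0 ≥ min_point) :=
              fun h => hse h.1.symm
            simp [hse, h1]
        · -- no point added
          have hstep : pvALoop min_point (S :: rest) (idxs.map (fun s => [s, c s]), idxs) =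
              pvALoop min_point rest (idxs.map (fun s => [s, c s]), idxs) := by
            simp only [pvALoop, hm, if_true, if_neg hp]
          rw [hstep]
          refine key idxs c hnd hadd (fun s hcase => ?_)
          rw [pvCnt_cons]
          have h1 : ¬ (PySem.List.pyGetD S 0 0 = s ∧ PySem.List.pyGetD S 1 0 ≥ min_point) :=
            fun h => hp h.2
          simp [h1]
      · -- new section appended with count 0
        have hadd : PySem.Set.add idxs (PySem.List.pyGetD S 0 0) = idxs ++ [PySem.List.pyGetD S 0 0] := by
          simp [PySem.Set.add, hm]
        have hnd₁ : (idxs ++ [PySem.List.pyGetD S 0 0]).Nodup := by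
          simp [List.nodup_append, hnd]
          exact fun a ha h => hm (h ▸ ha)
        have hmap₁ : ∀ c₁ : Int → Int, (∀ s ∈ idxs, c₁ s = c s) →
            idxs.map (fun s => [s, c s]) ++ [[PySem.List.pyGetD S 0 0, c₁ (PySem.List.pyGetD S 0 0)]] =
            (idxs ++ [PySem.List.pyGetD S 0 0]).map (fun s => [s, c₁ s]) := by
          intro c₁ hc₁
          simp only [List.map_append, List.map_cons, List.map_nil]
          congr 1
          exact (List.map_congr_left (fun s hs => by simp [hc₁ s hs])).symm
        by_cases hp : PySem.List.pyGetD S 1 0 ≥ min_point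
        · have hidx : PySem.List.index? (idxs ++ [PySem.List.pyGetD S 0 0]) (PySem.List.pyGetD S 0 0)
              = some idxs.length := PySem.List.index?_append_singleton_self idxs _ hm
          have hczero : ∀ s ∈ idxs, (if s = PySem.List.pyGetD S 0 0 then (0:Int) else c s) = c s :=
            fun s hs => by
              have : s ≠ PySem.List.pyGetD S 0 0 := fun h => hm (h ▸ hs)
              simp [this]
          have hcone : ∀ s ∈ idxs, (if s = PySem.List.pyGetD S 0 0 then (1:Int) else c s) = c s :=
            fun s hs => by
              have : s ≠ PySem.List.pyGetD S 0 0 := fun h => hm (h ▸ hs)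
              simp [this]
          have hmod : ((idxs.map (fun s => [s, c s]) ++ [[PySem.List.pyGetD S 0 0, 0]]).modify idxs.length pvInc1)
              = (idxs ++ [PySem.List.pyGetD S 0 0]).map
                  (fun s => [s, if s = PySem.List.pyGetD S 0 0 then 1 else c s]) := by
            have h0 : idxs.map (fun s => [s, c s]) ++ [[PySem.List.pyGetD S 0 0, 0]]
                = (idxs ++ PySem.List.pyGetD S 0 0 :: []).map
                    (fun s => [s, if s = PySem.List.pyGetD S 0 0 then 0 else c s]) := by
              have := hmap₁ (fun s => if s = PySem.List.pyGetD S 0 0 then 0 else c s) hczero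
              simpa using this
            rw [h0, pvModify_map]
            have hpre : idxs.map (fun s => [s, if s = PySem.List.pyGetD S 0 0 then (0:Int) else c s])
                = idxs.map (fun s => [s, if s = PySem.List.pyGetD S 0 0 then (1:Int) else c s]) :=
              List.map_congr_left (fun s hs => by rw [hczero s hs, hcone s hs])
            rw [hpre]
            simp [pvInc1]
          have hstep : pvALoop min_point (S :: rest) (idxs.map (fun s => [s, c s]), idxs) =
              pvALoop min_point rest
                ((idxs ++ [PySem.List.pyGetD S 0 0]).map
                  (fun s => [s, if s = PySem.List.pyGetD S 0 0 then 1 else c s]),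
                  idxs ++ [PySem.List.pyGetD S 0 0]) := by
            simp only [pvALoop, hm, if_false, if_pos hp, hidx, hmod]
          rw [hstep]
          refine key _ _ hnd₁ hadd (fun s hcase => ?_)
          rw [pvCnt_cons]
          by_cases hse : s = PySem.List.pyGetD S 0 0
          · subst hse
            simp [hm, hp]
          · have h1 : ¬ (PySem.List.pyGetD S 0 0 = s ∧ PySem.List.pyGetD S 1 0 ≥ min_point) :=
              fun h => hse h.1.symm
            simp [hse, h1, List.mem_append]
        · have hstep : pvALoop min_point (S :: rest) (idxs.map (fun s => [s, c s]), idxs) =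
              pvALoop min_point rest
                ((idxs ++ [PySem.List.pyGetD S 0 0]).map
                  (fun s => [s, if s = PySem.List.pyGetD S 0 0 then 0 else c s]),
                  idxs ++ [PySem.List.pyGetD S 0 0]) := by
            simp only [pvALoop, hm, if_false, if_neg hp]
            rw [← hmap₁ _ (fun s hs => by
              have : s ≠ PySem.List.pyGetD S 0 0 := fun h => hm (h ▸ hs)
              simp [this])]
            simp
          rw [hstep]
          refine key _ _ hnd₁ hadd (fun s hcase => ?_)
          rw [pvCnt_cons]
          have hnp2 : ¬ (PySem.List.pyGetD S 0 0 = s ∧ PySem.List.pyGetD S 1 0 ≥ min_point) :=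
            fun h => hp h.2
          by_cases hse : s = PySem.List.pyGetD S 0 0
          · subst hse
            simp [hm]
            omega
          · simp [hse, hnp2, List.mem_append]

-- A = B pointwise: A's loop yields the first-occurrence sections with their counts, sorting that
-- pair list lexicographically equals mapping the counts over the sorted sections (sections distinct).
lemma pvMain (sps : List (List Int)) (mp : Int) :
    get_section_point_count sps mp = get_section_point_count_alt sps mp := by
  have h0 : pvALoop mp sps (([] : List Int).map (fun s => [s, (0:Int)]), []) =
      ((PySem.Set.update [] (sps.map (fun s => PySem.List.pyGetD s 0 0))).map
          (fun s => [s, (if s ∈ ([] : List Int) then (0:Int) else 0) + pvCnt mp sps s]),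
        PySem.Set.update [] (sps.map (fun s => PySem.List.pyGetD s 0 0))) :=
    pvALoop_inv mp sps [] (fun _ => 0) List.nodup_nil
  have hof : PySem.Set.update ([] : List Int) (sps.map (fun s => PySem.List.pyGetD s 0 0)) =
      PySem.Set.ofList (sps.map (fun s => PySem.List.pyGetD s 0 0)) := rfl
  have h1 : (pvALoop mp sps ([], [])).1 =
      (PySem.Set.ofList (sps.map (fun s => PySem.List.pyGetD s 0 0))).map
        (fun s => [s, pvCnt mp sps s]) := by
    have := congrArg Prod.fst h0
    simpa [hof] using this
  have hsorted : PySem.List.sorted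
        ((PySem.Set.ofList (sps.map (fun s => PySem.List.pyGetD s 0 0))).map
          (fun s => [s, pvCnt mp sps s])) (fun x => x) =
      (PySem.List.sorted (PySem.Set.ofList (sps.map (fun s => PySem.List.pyGetD s 0 0))) (fun x => x)).map
        (fun s => [s, pvCnt mp sps s]) := by
    have hinst : (fun (a b : List Int) => a.decidableLT b) = (LinearOrder.toDecidableLT : DecidableLT (List Int)) :=
      Subsingleton.elim _ _
    rw [hinst]
    apply PySem.List.sorted_eq_of_perm_of_pairwise_lt
    · exact (PySem.List.sorted_perm _ _ _).map _
    · refine List.Pairwise.map _ (fun a b (h : a < b) => ?_)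
        (PySem.List.sorted_ofList_pairwise_lt (sps.map (fun s => PySem.List.pyGetD s 0 0)))
      exact List.Lex.rel h
  have hcnt : ∀ sec, sps.foldl
      (fun acc s => if PySem.List.pyGetD s 0 0 = sec ∧ PySem.List.pyGetD s 1 0 ≥ mp then acc + 1 else acc) 0
      = pvCnt mp sps sec := by
    intro sec
    have hfun : (fun (acc : Int) (s : List Int) =>
        if PySem.List.pyGetD s 0 0 = sec ∧ PySem.List.pyGetD s 1 0 ≥ mp then acc + 1 else acc)
        = (fun acc s => if (fun s => decide (PySem.List.pyGetD s 0 0 = sec ∧ PySem.List.pyGetD s 1 0 ≥ mp)) s = true then acc + 1 else acc) := by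
      funext acc s
      simp
    rw [hfun, PySem.List.foldl_count_if]
    simp [pvCnt]
  unfold get_section_point_count get_section_point_count_alt
  rw [h1, hsorted]
  exact List.map_congr_left (fun sec _ => by rw [hcnt sec])

-- ===== VERDICT (by name: the statement is the Claim_ definition above) =====
theorem get_section_point_count_spec : Claim_equal_get_section_point_count :=
  fun sps mp _ _ => pvMain sps mp
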